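-- pv_equiv track=rewrite | github.com/asafelobotomy/xanadassistant | scripts/lifecycle/xanad_assistant.py | extract_markdown_heading_block
-- ===== SOURCE A (Python) =====
-- def extract_markdown_heading_block(markdown_text: str, heading: str) -> str | None:
--     lines = markdown_text.splitlines()
--     for index, line in enumerate(lines):
--         if line.strip() != heading:
--             continue
--         end_index = len(lines)
--         for candidate in range(index + 1, len(lines)):
--             if lines[candidate].startswith("## "):
--                 end_index = candidate
--                 break
--         block = "\n".join(lines[index:end_index]).strip()
--         return block if block else None
--     return None
-- ===== SOURCE B (Python) =====
-- def extract_markdown_heading_block(markdown_text: str, heading: str) -> str | None: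
--     collected = []
--     capturing = False
--     for line in markdown_text.splitlines():
--         if capturing:
--             if line.startswith("## "):
--                 break
--             collected.append(line)
--         elif line.strip() == heading:
--             capturing = True
--             collected.append(line)
--     if not capturing:
--         return None
--     block = "\n".join(collected).strip()
--     return block if block else None
-- ===== Notes on version B (the rewrite author's own statement) =====
-- stated objective: simpler
-- what changed: Replaced the index-based locate-then-rescan-and-slice (enumerate, inner range scan for the section end, list slice and join) with a single pass over the lines carrying a capturing flag and an accumulator.
import Mathlib
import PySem

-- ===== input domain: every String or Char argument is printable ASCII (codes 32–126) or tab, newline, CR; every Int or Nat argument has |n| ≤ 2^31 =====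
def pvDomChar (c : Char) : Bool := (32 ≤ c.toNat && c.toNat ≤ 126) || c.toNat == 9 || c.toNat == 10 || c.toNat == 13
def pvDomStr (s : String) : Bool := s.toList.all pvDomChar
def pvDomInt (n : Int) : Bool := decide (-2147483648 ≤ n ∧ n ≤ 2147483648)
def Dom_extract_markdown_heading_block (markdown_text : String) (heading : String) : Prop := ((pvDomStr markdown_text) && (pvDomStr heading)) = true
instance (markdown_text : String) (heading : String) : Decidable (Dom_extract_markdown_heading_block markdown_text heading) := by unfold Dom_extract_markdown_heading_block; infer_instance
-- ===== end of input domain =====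

-- B replaces A's locate-then-rescan-and-slice with one pass carrying a capturing flag and an accumulator (simpler; same O(n) cost).

-- ===== PORT A =====
-- inner loop: for candidate in range(index+1, len(lines)): if lines[candidate].startswith("## "): break
def pvFindEnd (lines : List String) (c : Int) : Int :=
  if _h : c < (lines.length : Int) then
    if PySem.Str.startswith (PySem.List.pyGetD lines c "") "## " then c
    else pvFindEnd lines (c + 1)
  else (lines.length : Int)
termination_by ((lines.length : Int) - c).toNat
decreasing_by omega

-- outer loop over enumerate(lines)
def pvAGo (lines : List String) (heading : String) : List (Int × String) → Option String
  | [] => none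
  | (index, line) :: rest =>
    if PySem.Str.strip line ≠ heading then pvAGo lines heading rest
    else
      let e := pvFindEnd lines (index + 1)
      let block := PySem.Str.strip (PySem.Str.join "\n" (PySem.List.slice lines (some index) (some e)))
      if block = "" then none else some block

def extract_markdown_heading_block (markdown_text : String) (heading : String) : Option String :=
  let lines := PySem.Str.splitlines markdown_text
  pvAGo lines heading (PySem.List.enumerate lines 0)

-- ===== PORT B =====
-- single pass: capturing flag + accumulator
def pvBGo (heading : String) : List String → Bool → List String → Option (List String)
  | [], cap, acc => if cap then some acc else none
  | l :: ls, cap, acc =>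
    if cap then
      if PySem.Str.startswith l "## " then some acc
      else pvBGo heading ls true (acc ++ [l])
    else if PySem.Str.strip l = heading then pvBGo heading ls true (acc ++ [l])
    else pvBGo heading ls false acc

def extract_markdown_heading_block_alt (markdown_text : String) (heading : String) : Option String :=
  match pvBGo heading (PySem.Str.splitlines markdown_text) false [] with
  | none => none
  | some collected =>
    let block := PySem.Str.strip (PySem.Str.join "\n" collected)
    if block = "" then none else some block

-- ===== PRECONDITION & SPEC =====
def Spec_extract_markdown_heading_block (markdown_text : String) (heading : String) (out : Option String) : Prop := out = extract_markdown_heading_block_alt markdown_text heading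
instance (markdown_text : String) (heading : String) (out : Option String) : Decidable (Spec_extract_markdown_heading_block markdown_text heading out) := by unfold Spec_extract_markdown_heading_block; infer_instance

-- ===== CLAIM (what is proved, stated in full; the proofs are below) =====
def Claim_equal_extract_markdown_heading_block : Prop := ∀ (markdown_text : String) (heading : String), Dom_extract_markdown_heading_block markdown_text heading → Spec_extract_markdown_heading_block markdown_text heading (extract_markdown_heading_block markdown_text heading)

-- ===== LEMMAS AND PROOFS =====

def pvGood (l : String) : Bool := !PySem.Str.startswith l "## "

def pvFinalize (coll? : Option (List String)) : Option String :=
  match coll? with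
  | none => none
  | some collected =>
    let block := PySem.Str.strip (PySem.Str.join "\n" collected)
    if block = "" then none else some block

theorem pvBGo_cap (heading : String) (ls : List String) : ∀ acc,
    pvBGo heading ls true acc = some (acc ++ ls.takeWhile pvGood) := by
  induction ls with
  | nil => intro acc; simp [pvBGo]
  | cons l ls ih =>
    intro acc
    cases h : PySem.Str.startswith l "## " with
    | true =>
      simp at h
      simp [pvBGo, List.takeWhile, pvGood, h]
    | false =>
      simp at h
      simp [pvBGo, List.takeWhile, pvGood, h, ih]

theorem pvTake_takeWhile {α : Type} (p : α → Bool) (xs : List α) :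
    xs.take ((xs.takeWhile p).length) = xs.takeWhile p := by
  induction xs with
  | nil => simp
  | cons x xs ih =>
    by_cases h : p x <;> simp [List.takeWhile, h, ih]

theorem pvFindEnd_eq (lines : List String) (k : Nat) (hk : k ≤ lines.length) :
    pvFindEnd lines (k : Int) = ((k + ((lines.drop k).takeWhile pvGood).length : Nat) : Int) := by
  induction hn : lines.length - k generalizing k with
  | zero =>
    rw [pvFindEnd, dif_neg (by exact_mod_cast (by omega : ¬ k < lines.length))]
    have hd : lines.drop k = [] := List.drop_eq_nil_of_le (by omega)
    rw [hd]
    simp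
    omega
  | succ n ih =>
    have hklt : k < lines.length := by omega
    have hdrop : lines.drop k = lines[k] :: lines.drop (k + 1) := List.drop_eq_getElem_cons hklt
    have hget : PySem.List.pyGetD lines (k : Int) "" = lines[k] := by
      simp [PySem.List.pyGetD_natCast, hklt]
    rw [pvFindEnd, dif_pos (by exact_mod_cast hklt), hget]
    cases h : PySem.Str.startswith lines[k] "## " with
    | true =>
      simp at h
      rw [hdrop, List.takeWhile_cons]
      simp [pvGood, h]
    | false =>
      simp at h
      have hc : ((k : Int) + 1) = ((k + 1 : Nat) : Int) := by push_cast; ring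
      rw [if_neg (by simp), hc, ih (k + 1) (by omega) (by omega), hdrop,
        List.takeWhile_cons]
      simp [pvGood, h]
      ring

theorem pvMain (lines : List String) (heading : String) (k : Nat) (hk : k ≤ lines.length) :
    pvAGo lines heading (PySem.List.enumerate (lines.drop k) (k : Int)) =
      pvFinalize (pvBGo heading (lines.drop k) false []) := by
  induction hn : lines.length - k generalizing k with
  | zero =>
    have hke : lines.drop k = [] := List.drop_eq_nil_of_le (by omega)
    simp [hke, pvAGo, pvBGo, pvFinalize]
  | succ n ih =>
    have hklt : k < lines.length := by omega
    have hdrop : lines.drop k = lines[k] :: lines.drop (k + 1) := List.drop_eq_getElem_cons hklt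
    have hc : ((k : Int) + 1) = ((k + 1 : Nat) : Int) := by push_cast; ring
    rw [hdrop, PySem.List.enumerate_cons, pvAGo]
    by_cases h : PySem.Str.strip lines[k] = heading
    · -- found: A slices from k to the end of the section, B captures line by line
      rw [if_neg (not_not_intro h), pvBGo, if_neg Bool.false_ne_true, if_pos h, pvBGo_cap]
      have he : pvFindEnd lines ((k : Int) + 1) =
          (((k + 1) + ((lines.drop (k + 1)).takeWhile pvGood).length : Nat) : Int) := by
        rw [hc, pvFindEnd_eq lines (k + 1) (by omega)]
      have hslice : PySem.List.slice lines (some (k : Int))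
          (some (((k + 1) + ((lines.drop (k + 1)).takeWhile pvGood).length : Nat) : Int)) =
          lines[k] :: (lines.drop (k + 1)).takeWhile pvGood := by
        rw [PySem.List.slice_natCast,
          (by omega : (k + 1 + ((lines.drop (k + 1)).takeWhile pvGood).length) - k
            = ((lines.drop (k + 1)).takeWhile pvGood).length + 1),
          hdrop, List.take_succ_cons, pvTake_takeWhile]
      simp only []
      rw [he, hslice]
      simp [pvFinalize]
    · -- not the heading: both sides skip this line
      rw [if_pos h, pvBGo, if_neg Bool.false_ne_true, if_neg h, hc,
        ih (k + 1) (by omega) (by omega)]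

-- ===== VERDICT (by name: the statement is the Claim_ definition above) =====
theorem extract_markdown_heading_block_spec : Claim_equal_extract_markdown_heading_block := by
  intro markdown_text heading _
  unfold Spec_extract_markdown_heading_block extract_markdown_heading_block extract_markdown_heading_block_alt
  have := pvMain (PySem.Str.splitlines markdown_text) heading 0 (Nat.zero_le _)
  simpa [pvFinalize] using this
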